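-- pv_equiv track=rewrite | github.com/sdrobac/exyu-parl-ocr | find-bold.py | concatenate_with_bold_tags
-- ===== SOURCE A (Python) =====
-- def concatenate_with_bold_tags(data):
--     result = ""
--     is_in_bold = False
--
--     for item, attributes in data:
--         if 'bold' in attributes and attributes['bold']:
--             if not is_in_bold:
--                 result += "<BOLD>"
--                 is_in_bold = True
--             result += item
--         else:
--             if is_in_bold:
--                 result += "</BOLD>"
--                 is_in_bold = False
--             result += item
--
--     if is_in_bold:
--         result += "</BOLD>"
--     return result
-- ===== SOURCE B (Python) =====
-- def concatenate_with_bold_tags(data):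
--     # Run-splitting decomposition: cut data into maximal runs of equal bold-ness,
--     # render each run at once, then join.
--     parts = []
--     i, n = 0, len(data)
--     while i < n:
--         b = bool(data[i][1].get('bold'))
--         j = i + 1
--         while j < n and bool(data[j][1].get('bold')) == b:
--             j += 1
--         joined = ''.join(item for item, _ in data[i:j])
--         parts.append('<BOLD>' + joined + '</BOLD>' if b else joined)
--         i = j
--     return ''.join(parts)
-- ===== Notes on version B (the rewrite author's own statement) =====
-- stated objective: alternative
-- what changed: Replaces A's character-state machine (is_in_bold flag with open/close transitions inside one accumulating loop) by a grouping decomposition: split data into maximal runs of equal bold-ness, join each run once, wrap bold runs, and join the rendered parts.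
import Mathlib
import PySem

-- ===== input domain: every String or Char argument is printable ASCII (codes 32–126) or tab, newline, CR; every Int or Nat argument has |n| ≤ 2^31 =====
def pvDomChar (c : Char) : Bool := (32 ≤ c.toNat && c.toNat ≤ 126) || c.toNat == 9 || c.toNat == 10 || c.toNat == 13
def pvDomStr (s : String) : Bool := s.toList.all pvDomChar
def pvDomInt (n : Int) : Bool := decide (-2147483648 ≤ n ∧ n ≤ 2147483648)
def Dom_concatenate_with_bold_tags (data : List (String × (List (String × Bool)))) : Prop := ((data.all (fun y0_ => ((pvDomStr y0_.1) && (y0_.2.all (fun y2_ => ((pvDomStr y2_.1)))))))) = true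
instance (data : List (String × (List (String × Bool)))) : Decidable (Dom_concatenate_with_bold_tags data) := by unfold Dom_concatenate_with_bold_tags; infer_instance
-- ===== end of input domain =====

-- B replaces A's is_in_bold state machine by a run-splitting (group-then-render) decomposition; objective: alternative.

-- ===== PORT A =====
-- one loop step of A: state = (result, is_in_bold)
def pvStepA (st : String × Bool) (p : String × (List (String × Bool))) : String × Bool :=
  let d := PySem.Dict.mk p.2
  if d.contains "bold" && ((d.get? "bold").getD false) then
    let st' := if !st.2 then (st.1 ++ "<BOLD>", true) else st
    (st'.1 ++ p.1, st'.2)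
  else
    let st' := if st.2 then (st.1 ++ "</BOLD>", false) else st
    (st'.1 ++ p.1, st'.2)

def concatenate_with_bold_tags (data : List (String × (List (String × Bool)))) : String :=
  let r := data.foldl pvStepA ("", false)
  if r.2 then r.1 ++ "</BOLD>" else r.1

-- ===== PORT B =====
-- bool(attributes.get('bold'))
def pvIsBold (attrs : List (String × Bool)) : Bool :=
  ((PySem.Dict.mk attrs).get? "bold").getD false

-- the outer while loop of B: take the maximal run with the head's bold-ness, render it, recurse on the rest
def pvRender : List (String × (List (String × Bool))) → String
  | [] => ""
  | x :: xs =>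
    let b := pvIsBold x.2
    let run := x :: xs.takeWhile (fun y => pvIsBold y.2 == b)
    let rest := xs.dropWhile (fun y => pvIsBold y.2 == b)
    let joined := String.join (run.map (·.1))
    (if b then "<BOLD>" ++ joined ++ "</BOLD>" else joined) ++ pvRender rest
termination_by l => l.length
decreasing_by
  simpa using Nat.lt_succ_of_le (List.length_dropWhile_le _ _)

def concatenate_with_bold_tags_alt (data : List (String × (List (String × Bool)))) : String :=
  pvRender data

-- ===== PRECONDITION & SPEC =====
def Spec_concatenate_with_bold_tags (data : List (String × (List (String × Bool)))) (out : String) : Prop := out = concatenate_with_bold_tags_alt data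
instance (data : List (String × (List (String × Bool)))) (out : String) : Decidable (Spec_concatenate_with_bold_tags data out) := by unfold Spec_concatenate_with_bold_tags; infer_instance

-- ===== CLAIM (what is proved, stated in full; the proofs are below) =====
def Claim_equal_concatenate_with_bold_tags : Prop := ∀ (data : List (String × (List (String × Bool)))), Dom_concatenate_with_bold_tags data → Spec_concatenate_with_bold_tags data (concatenate_with_bold_tags data)

-- ===== LEMMAS AND PROOFS =====

-- rendering continuation while already inside a <BOLD> run
def pvInBold : List (String × (List (String × Bool))) → String
  | [] => "</BOLD>"
  | x :: xs => if pvIsBold x.2 then x.1 ++ pvInBold xs else "</BOLD>" ++ pvRender (x :: xs)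

theorem pvFoldl_append_shift (l : List String) :
    ∀ a : String, List.foldl (fun r s => r ++ s) a l = a ++ List.foldl (fun r s => r ++ s) "" l := by
  induction l with
  | nil => intro a; simp
  | cons s l ih =>
    intro a
    simp only [List.foldl_cons]
    rw [ih (a ++ s), ih ("" ++ s)]
    simp [String.append_assoc]

theorem pvJoin_nil : String.join ([] : List String) = "" := rfl

theorem pvJoin_cons (s : String) (l : List String) : String.join (s :: l) = s ++ String.join l := by
  show List.foldl (fun r s => r ++ s) ("" ++ s) l = _
  rw [pvFoldl_append_shift]
  simp [String.join]

theorem pvStepA_cond (attrs : List (String × Bool)) :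
    (((PySem.Dict.mk attrs).contains "bold") && (((PySem.Dict.mk attrs).get? "bold").getD false)) = pvIsBold attrs := by
  rw [PySem.Dict.contains_eq_isSome_get?]
  unfold pvIsBold
  cases (PySem.Dict.mk attrs).get? "bold" <;> simp

theorem pvRender_run_false (l : List (String × (List (String × Bool)))) :
    String.join ((l.takeWhile (fun y => pvIsBold y.2 == false)).map (·.1))
      ++ pvRender (l.dropWhile (fun y => pvIsBold y.2 == false)) = pvRender l := by
  cases l with
  | nil => simp [pvRender, pvJoin_nil]
  | cons x xs =>
    by_cases h : pvIsBold x.2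
    · simp [List.takeWhile, List.dropWhile, h, pvJoin_nil]
    · simp only [Bool.not_eq_true] at h
      rw [pvRender]
      simp [List.takeWhile, List.dropWhile, h]

theorem pvRender_cons_false (x : String × (List (String × Bool))) (xs : List (String × (List (String × Bool))))
    (h : pvIsBold x.2 = false) : pvRender (x :: xs) = x.1 ++ pvRender xs := by
  rw [pvRender]
  simp only [h]
  rw [← pvRender_run_false xs]
  simp [pvJoin_cons, String.append_assoc]

theorem pvInBold_eq (l : List (String × (List (String × Bool)))) :
    pvInBold l = String.join ((l.takeWhile (fun y => pvIsBold y.2 == true)).map (·.1))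
      ++ "</BOLD>" ++ pvRender (l.dropWhile (fun y => pvIsBold y.2 == true)) := by
  induction l with
  | nil => simp [pvInBold, pvRender, pvJoin_nil]
  | cons x xs ih =>
    by_cases h : pvIsBold x.2
    · simp [pvInBold, h, ih, List.takeWhile, List.dropWhile, pvJoin_cons, String.append_assoc]
    · simp only [Bool.not_eq_true] at h
      simp [pvInBold, h, List.takeWhile, List.dropWhile, pvJoin_nil]

theorem pvRender_cons_true (x : String × (List (String × Bool))) (xs : List (String × (List (String × Bool))))
    (h : pvIsBold x.2 = true) : pvRender (x :: xs) = "<BOLD>" ++ pvInBold (x :: xs) := by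
  rw [pvRender, pvInBold_eq]
  simp [h, List.takeWhile, List.dropWhile, String.append_assoc]

theorem pvMain (l : List (String × (List (String × Bool)))) :
    ∀ (res : String) (flag : Bool),
      (let r := l.foldl pvStepA (res, flag); if r.2 then r.1 ++ "</BOLD>" else r.1)
        = res ++ (if flag then pvInBold l else pvRender l) := by
  induction l with
  | nil =>
    intro res flag
    cases flag <;> simp [pvInBold, pvRender]
  | cons x xs ih =>
    intro res flag
    have hc := pvStepA_cond x.2
    have hstep : pvStepA (res, flag) x =
        if pvIsBold x.2 then
          (if flag then (res ++ x.1, true) else (res ++ "<BOLD>" ++ x.1, true))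
        else
          (if flag then (res ++ "</BOLD>" ++ x.1, false) else (res ++ x.1, false)) := by
      cases hb : pvIsBold x.2 <;> rw [hb] at hc <;> cases flag <;>
        (simp only [pvStepA]; rw [hc]; simp)
    simp only [List.foldl_cons, hstep]
    cases hb : pvIsBold x.2 <;> cases flag <;>
      simp only [if_true, if_false, Bool.false_eq_true, ih]
    · rw [pvRender_cons_false _ _ hb, String.append_assoc]
    · rw [pvInBold]
      simp [hb, pvRender_cons_false _ _ hb, String.append_assoc]
    · rw [pvRender_cons_true _ _ hb, pvInBold]
      simp [hb, String.append_assoc]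
    · rw [pvInBold]
      simp [hb, String.append_assoc]

-- ===== VERDICT (by name: the statement is the Claim_ definition above) =====
theorem concatenate_with_bold_tags_spec : Claim_equal_concatenate_with_bold_tags := by
  intro data _
  show concatenate_with_bold_tags data = concatenate_with_bold_tags_alt data
  have := pvMain data "" false
  simpa [concatenate_with_bold_tags, concatenate_with_bold_tags_alt] using this
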